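-- pv_equiv track=rewrite | github.com/OscarLawrence/MomoAI | code/libs/python/kb-playground/kb_playground/enhanced_local_kb.py | _detect_scope
-- ===== SOURCE A (Python) =====
-- from typing import Dict, List, Set, Tuple, Any, Optional, Iterator
--
-- def _detect_scope(lines: List[str], line_num: int) -> str:
--     """Detect if entity is at module, class, or function scope."""
--     # Look backwards to find containing scope
--     for i in range(line_num - 2, -1, -1):
--         line = lines[i].strip()
--         if line.startswith('class '):
--             return 'class'
--         elif line.startswith('def '):
--             return 'function'
--     return 'module'
-- ===== SOURCE B (Python) =====
-- def _detect_scope(lines, line_num):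
--     """Detect if entity is at module, class, or function scope."""
--     # Forward single pass over the lines above line_num: last seen scope header wins.
--     scope = 'module'
--     for line in lines[:max(line_num - 1, 0)]:
--         s = line.strip()
--         if s.startswith('class '):
--             scope = 'class'
--         elif s.startswith('def '):
--             scope = 'function'
--     return scope
-- ===== Notes on version B (the rewrite author's own statement) =====
-- stated objective: alternative
-- what changed: Replaced the backward early-returning index scan with a forward fold over the line prefix that keeps a running scope, last match winning (first-match-backward = last-match-forward).
import Mathlib
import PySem

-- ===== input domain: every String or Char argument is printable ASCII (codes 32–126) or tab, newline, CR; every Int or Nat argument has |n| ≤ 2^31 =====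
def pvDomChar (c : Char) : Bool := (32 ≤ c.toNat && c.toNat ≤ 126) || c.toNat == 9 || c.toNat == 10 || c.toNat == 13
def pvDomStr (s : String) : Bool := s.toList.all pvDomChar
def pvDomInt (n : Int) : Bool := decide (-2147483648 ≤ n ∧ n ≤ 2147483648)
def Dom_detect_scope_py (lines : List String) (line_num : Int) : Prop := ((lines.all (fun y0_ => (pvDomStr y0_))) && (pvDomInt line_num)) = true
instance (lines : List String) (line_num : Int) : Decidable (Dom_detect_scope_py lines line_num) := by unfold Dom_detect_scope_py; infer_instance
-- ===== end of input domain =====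

-- B replaces A's backward early-returning scan with a forward fold keeping a running scope
-- (last match wins); equivalence is about the return value, neither mutates its arguments.

-- ===== PORT A =====
-- for i in range(line_num - 2, -1, -1): first 'class '/'def ' header wins (early return
-- modelled as an Option accumulator that stays 'some' once set); lines[i] would raise on
-- out-of-range i (excluded by Pre_), here defaulted via getD outside Pre_.
def detect_scope_py (lines : List String) (line_num : Int) : String :=
  ((PySem.List.pyRange (line_num - 2) (-1) (-1)).foldl
    (fun acc i =>
      match acc with
      | some s => some s
      | none =>
        let line := PySem.Str.strip ((PySem.List.pyGet? lines i).getD "")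
        if PySem.Str.startswith line "class " then some "class"
        else if PySem.Str.startswith line "def " then some "function"
        else none)
    none).getD "module"

-- ===== PORT B =====
-- forward fold over lines[:max(line_num - 1, 0)], last scope header seen wins.
def detect_scope_py_alt (lines : List String) (line_num : Int) : String :=
  (PySem.List.slice lines none (some (max (line_num - 1) 0))).foldl
    (fun scope line =>
      let s := PySem.Str.strip line
      if PySem.Str.startswith s "class " then "class"
      else if PySem.Str.startswith s "def " then "function"
      else scope)
    "module"

-- ===== PRECONDITION & SPEC =====
-- A indexes lines[line_num - 2] first; it raises IndexError iff line_num ≥ len(lines) + 2.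
def Pre_detect_scope_py (lines : List String) (line_num : Int) : Prop :=
  line_num ≤ (lines.length : Int) + 1
instance (lines : List String) (line_num : Int) : Decidable (Pre_detect_scope_py lines line_num) := by unfold Pre_detect_scope_py; infer_instance

def pvWitness_detect_scope_py : List String × Int := (["class A:", "  x = 1"], 2)

def Spec_detect_scope_py (lines : List String) (line_num : Int) (out : String) : Prop := out = detect_scope_py_alt lines line_num
instance (lines : List String) (line_num : Int) (out : String) : Decidable (Spec_detect_scope_py lines line_num out) := by unfold Spec_detect_scope_py; infer_instance

-- ===== CLAIM (what is proved, stated in full; the proofs are below) =====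
def Claim_equal_detect_scope_py : Prop := ∀ (lines : List String) (line_num : Int), Dom_detect_scope_py lines line_num → Pre_detect_scope_py lines line_num → Spec_detect_scope_py lines line_num (detect_scope_py lines line_num)

-- ===== LEMMAS AND PROOFS =====

-- A's classify-one-line step (early-return accumulator).
def pvStepA (acc : Option String) (line : String) : Option String :=
  match acc with
  | some s => some s
  | none =>
    let s := PySem.Str.strip line
    if PySem.Str.startswith s "class " then some "class"
    else if PySem.Str.startswith s "def " then some "function"
    else none

-- B's step (running scope, last match wins).
def pvStepB (scope : String) (line : String) : String :=
  let s := PySem.Str.strip line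
  if PySem.Str.startswith s "class " then "class"
  else if PySem.Str.startswith s "def " then "function"
  else scope

-- first-match over the reversed list equals last-match forward.
theorem pvRev_foldl (l : List String) (init : String) :
    (l.reverse.foldl pvStepA none).getD init = l.foldl pvStepB init := by
  induction l generalizing init with
  | nil => rfl
  | cons x t ih =>
    simp only [List.reverse_cons, List.foldl_append, List.foldl_cons, List.foldl_nil]
    rw [← ih (pvStepB init x)]
    cases h : t.reverse.foldl pvStepA none with
    | some s => simp [pvStepA]
    | none => simp [pvStepA, pvStepB]; split_ifs <;> simp

-- the indices A visits fetch exactly the prefix lines[:b], for 0 ≤ b ≤ len.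
theorem pvMap_fetch (lines : List String) (b : Int)
    (hble : b ≤ (lines.length : Int)) :
    (PySem.List.pyRange 0 b 1).map (fun i => (PySem.List.pyGet? lines i).getD "")
      = lines.take b.toNat := by
  apply List.ext_getElem
  · simp [PySem.List.length_pyRange_one]
    omega
  · intro j h1 h2
    have hj : (j : Int) < b := by
      simp [PySem.List.length_pyRange_one] at h1; omega
    have hjl : j < lines.length := by omega
    simp [PySem.List.getElem_pyRange_one, PySem.List.pyGet?,
      PySem.List.pyIdx?, hjl]

-- A's fold over indices is the pvStepA fold over the fetched lines.
theorem pvFoldA_eq (lines : List String) (R : List Int) (acc : Option String) :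
    R.foldl (fun acc i =>
      match acc with
      | some s => some s
      | none =>
        let line := PySem.Str.strip ((PySem.List.pyGet? lines i).getD "")
        if PySem.Str.startswith line "class " then some "class"
        else if PySem.Str.startswith line "def " then some "function"
        else none) acc
    = (R.map (fun i => (PySem.List.pyGet? lines i).getD "")).foldl pvStepA acc := by
  induction R generalizing acc with
  | nil => rfl
  | cons x t ih =>
    simp only [List.foldl_cons, List.map_cons]
    exact ih _

-- ===== VERDICT (by name: the statement is the Claim_ definition above) =====
theorem detect_scope_py_spec : Claim_equal_detect_scope_py := by
  intro lines line_num _ hpre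
  unfold Spec_detect_scope_py detect_scope_py detect_scope_py_alt Pre_detect_scope_py at *
  by_cases hle : line_num - 1 ≤ 0
  · rw [PySem.List.pyRange_neg_one_eq_nil (by omega)]
    have h0 : max (line_num - 1) 0 = 0 := by omega
    rw [h0, PySem.List.slice_to lines (by omega)]
    rfl
  · have hmax : max (line_num - 1) 0 = line_num - 1 := by omega
    rw [hmax, PySem.List.slice_to lines (by omega)]
    have hrev := PySem.List.pyRange_neg_one_eq_reverse (line_num - 2) (-1)
    rw [show line_num - 2 + 1 = line_num - 1 from by ring,
      show (-1 : Int) + 1 = 0 from by norm_num] at hrev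
    rw [hrev, pvFoldA_eq, List.map_reverse,
      pvMap_fetch lines (line_num - 1) (by omega), pvRev_foldl]
    rfl
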